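-- pv_equiv track=rewrite | github.com/Ayulgabriel42/afina-mvp-streamlit | src/statement_mapper.py | suggest_sheet_mapping
-- ===== SOURCE A (Python) =====
-- NO_USAR = "No usar"
--
-- SHEET_PATTERNS = {
--     "balance": [
--         "balance sheet",
--         "balance",
--         "bs mes",
--         "asset accounts",
--         "liability accounts",
--         "estado de situacion",
--         "estado de situación"
--     ],
--     "pnl": [
--         "p&l statement",
--         "p&l",
--         "profit and loss",
--         "resultados",
--         "estado de resultados",
--         "pl mes"
--     ],
--     "cashflow": [
--         "cash flow statement",
--         "cash flow",
--         "flujo",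
--         "cfs",
--         "cfs mes"
--     ],
--     "ratios": [
--         "financial ratios",
--         "ratios",
--         "indicadores"
--     ],
--     "database": [
--         "data base",
--         "database",
--         "base contable",
--         "bc.",
--         "bc. me"
--     ]
-- }
--
-- def normalize(value):
--     return str(value).strip().lower()
--
-- def suggest_sheet_mapping(sheet_names):
--     """
--     Sugiere qué hoja corresponde a cada estado financiero.
--     """
--     suggestions = {}
--
--     normalized_sheets = {
--         sheet: normalize(sheet)
--         for sheet in sheet_names
--     }
--
--     for role, patterns in SHEET_PATTERNS.items():
--         suggestions[role] = NO_USAR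
--
--         for sheet, normalized_sheet in normalized_sheets.items():
--             for pattern in patterns:
--                 if pattern in normalized_sheet:
--                     suggestions[role] = sheet
--                     break
--
--             if suggestions[role] != NO_USAR:
--                 break
--
--     return suggestions
-- ===== SOURCE B (Python) =====
-- NO_USAR = "No usar"
--
-- SHEET_PATTERNS = {
--     "balance": [
--         "balance sheet",
--         "balance",
--         "bs mes",
--         "asset accounts",
--         "liability accounts",
--         "estado de situacion",
--         "estado de situaci\u00f3n"
--     ],
--     "pnl": [
--         "p&l statement",
--         "p&l",
--         "profit and loss",
--         "resultados",
--         "estado de resultados",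
--         "pl mes"
--     ],
--     "cashflow": [
--         "cash flow statement",
--         "cash flow",
--         "flujo",
--         "cfs",
--         "cfs mes"
--     ],
--     "ratios": [
--         "financial ratios",
--         "ratios",
--         "indicadores"
--     ],
--     "database": [
--         "data base",
--         "database",
--         "base contable",
--         "bc.",
--         "bc. me"
--     ]
-- }
--
--
-- def suggest_sheet_mapping(sheet_names):
--     # One sheet-driven pass: each sheet is normalized once and offered to the
--     # roles that are still unassigned; stops early when every role is assigned.
--     assigned = {}
--     remaining = list(SHEET_PATTERNS)
--     for sheet in sheet_names:
--         if not remaining: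
--             break
--         ns = str(sheet).strip().lower()
--         for role in remaining:
--             if any(p in ns for p in SHEET_PATTERNS[role]):
--                 assigned[role] = sheet
--         remaining = [role for role in remaining if role not in assigned]
--     return {role: assigned.get(role, NO_USAR) for role in SHEET_PATTERNS}
-- ===== Notes on version B (the rewrite author's own statement) =====
-- stated objective: alternative
-- what changed: A makes, for every role, a fresh scan over all (dict-deduplicated) sheets with nested break logic; B normalizes each sheet once and makes a single sheet-driven pass that offers the sheet to the still-unassigned roles and stops early once every role is assigned.
import Mathlib
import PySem

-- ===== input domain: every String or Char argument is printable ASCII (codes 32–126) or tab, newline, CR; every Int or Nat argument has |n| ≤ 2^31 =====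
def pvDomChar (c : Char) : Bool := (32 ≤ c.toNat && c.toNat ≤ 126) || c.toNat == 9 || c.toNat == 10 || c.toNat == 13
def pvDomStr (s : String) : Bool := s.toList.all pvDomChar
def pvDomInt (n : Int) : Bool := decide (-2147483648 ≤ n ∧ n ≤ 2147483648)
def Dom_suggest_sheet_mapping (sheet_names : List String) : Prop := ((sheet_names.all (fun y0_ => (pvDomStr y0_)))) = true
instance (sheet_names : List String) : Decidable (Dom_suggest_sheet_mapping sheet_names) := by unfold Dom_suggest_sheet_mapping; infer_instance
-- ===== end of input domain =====

-- B replaces A's per-role repeated scan over all sheets by one sheet-driven pass that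
-- maintains the set of still-unassigned roles (objective: alternative decomposition).

-- ===== PORT A =====
def pvNoUsar : String := "No usar"

def pvSheetPatterns : List (String × List String) :=
  [("balance", ["balance sheet", "balance", "bs mes", "asset accounts",
                "liability accounts", "estado de situacion", "estado de situación"]),
   ("pnl", ["p&l statement", "p&l", "profit and loss", "resultados",
            "estado de resultados", "pl mes"]),
   ("cashflow", ["cash flow statement", "cash flow", "flujo", "cfs", "cfs mes"]),
   ("ratios", ["financial ratios", "ratios", "indicadores"]),
   ("database", ["data base", "database", "base contable", "bc.", "bc. me"])]

-- normalize(value) = str(value).strip().lower()  (str() is the identity on strings)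
def pvNormalize (value : String) : String := PySem.Str.lower (PySem.Str.strip value)

-- inner 'for pattern in patterns: … break'
def aPatLoop (role sheet ns : String) (patterns : List String)
    (sug : PySem.Dict String String) : PySem.Dict String String :=
  match patterns with
  | [] => sug
  | p :: ps => if PySem.Str.isIn p ns then sug.insert role sheet else aPatLoop role sheet ns ps sug

-- 'for sheet, normalized_sheet in normalized_sheets.items(): … if suggestions[role] != NO_USAR: break'
def aSheetLoop (role : String) (patterns : List String)
    (items : List (String × String)) (sug : PySem.Dict String String) : PySem.Dict String String :=
  match items with
  | [] => sug
  | (sheet, ns) :: rest =>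
    let sug' := aPatLoop role sheet ns patterns sug
    if sug'.getD role pvNoUsar = pvNoUsar then aSheetLoop role patterns rest sug' else sug'

def suggest_sheet_mapping (sheet_names : List String) : List (String × String) :=
  let normalized_sheets :=
    sheet_names.foldl (fun d s => d.insert s (pvNormalize s)) PySem.Dict.empty
  let suggestions :=
    pvSheetPatterns.foldl
      (fun d rp => aSheetLoop rp.1 rp.2 normalized_sheets.items (d.insert rp.1 pvNoUsar))
      PySem.Dict.empty
  suggestions.items

-- ===== PORT B =====
def bMatch (pats : List String) (ns : String) : Bool :=
  pats.any (fun p => PySem.Str.isIn p ns)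

-- SHEET_PATTERNS[role]
def bPats (role : String) : List String :=
  (PySem.Dict.mk pvSheetPatterns).getD role []

-- 'for sheet in sheet_names: if not remaining: break; …'
def bLoop (sheets : List String) (assigned : PySem.Dict String String)
    (remaining : List String) : PySem.Dict String String :=
  match sheets with
  | [] => assigned
  | sheet :: rest =>
    if remaining.isEmpty then assigned else
    let ns := PySem.Str.lower (PySem.Str.strip sheet)
    let assigned' :=
      remaining.foldl (fun a role => if bMatch (bPats role) ns then a.insert role sheet else a)
        assigned
    bLoop rest assigned' (remaining.filter (fun role => !(assigned'.contains role)))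

def suggest_sheet_mapping_alt (sheet_names : List String) : List (String × String) :=
  let assigned := bLoop sheet_names PySem.Dict.empty (pvSheetPatterns.map (·.1))
  (pvSheetPatterns.foldl
      (fun d rp => d.insert rp.1 (assigned.getD rp.1 pvNoUsar)) PySem.Dict.empty).items

-- ===== PRECONDITION & SPEC =====
def Spec_suggest_sheet_mapping (sheet_names : List String) (out : List (String × String)) : Prop := out = suggest_sheet_mapping_alt sheet_names
instance (sheet_names : List String) (out : List (String × String)) : Decidable (Spec_suggest_sheet_mapping sheet_names out) := by unfold Spec_suggest_sheet_mapping; infer_instance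

-- ===== CLAIM (what is proved, stated in full; the proofs are below) =====
def Claim_equal_suggest_sheet_mapping : Prop := ∀ (sheet_names : List String), Dom_suggest_sheet_mapping sheet_names → Spec_suggest_sheet_mapping sheet_names (suggest_sheet_mapping sheet_names)

-- ===== LEMMAS AND PROOFS =====

-- first sheet of xs whose normalization matches pats, else NO_USAR
def pvFirst (pats : List String) (xs : List String) : String :=
  match xs.find? (fun s => bMatch pats (pvNormalize s)) with
  | some s => s
  | none => pvNoUsar

theorem get?_normFold (xs : List String) (d : PySem.Dict String String) (k : String) :
    (xs.foldl (fun d s => d.insert s (pvNormalize s)) d).get? k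
      = if k ∈ xs then some (pvNormalize k) else d.get? k := by
  induction xs generalizing d with
  | nil => simp
  | cons x xs ih =>
    simp only [List.foldl_cons, ih, PySem.Dict.get?_insert, List.mem_cons]
    by_cases hx : k ∈ xs <;> by_cases he : k = x <;> simp [hx, he]

theorem items_normFold (xs : List String) :
    (xs.foldl (fun d s => d.insert s (pvNormalize s)) PySem.Dict.empty).items
      = (PySem.List.dedup xs).map (fun k => (k, pvNormalize k)) := by
  rw [PySem.Dict.items_eq_map_keys _ (PySem.Dict.nodup_keys_foldl_insert _ _ _ (by simp)) ""]
  rw [PySem.Dict.keys_foldl_insert]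
  have hk : PySem.Set.update (PySem.Dict.keys (PySem.Dict.empty (κ := String) (ν := String))) xs
      = PySem.List.dedup xs := by
    simp [PySem.Set.update, PySem.List.dedup, PySem.Set.ofList, PySem.Dict.keys_empty,
      PySem.Set.empty]
  rw [hk]
  apply List.map_congr_left
  intro k hkmem
  have hmem : k ∈ xs := by
    rwa [PySem.List.dedup_eq_ofList, PySem.Set.mem_ofList] at hkmem
  simp [PySem.Dict.getD_eq_get?_getD, get?_normFold, hmem]

theorem find?_foldl_add (xs acc : List String) (p : String → Bool) :
    (List.foldl PySem.Set.add acc xs).find? p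
      = ((acc.find? p).orElse (fun _ => xs.find? p)) := by
  induction xs generalizing acc with
  | nil => cases h : acc.find? p <;> simp [Option.orElse, h]
  | cons x xs ih =>
    simp only [List.foldl_cons, PySem.Set.add]
    by_cases hc : PySem.Set.contains acc x = true
    · rw [if_pos hc, ih]
      cases h : acc.find? p with
      | some v => simp [Option.orElse, h]
      | none =>
        have hx : p x = false := by
          have := List.find?_eq_none.mp h x (by
            rcases List.contains_iff_exists_mem_beq.mp hc with ⟨y, hy, hb⟩
            rwa [show x = y from by simpa using hb])
          simpa using this
        simp [Option.orElse, hx]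
    · rw [if_neg hc, ih, List.find?_append]
      cases h : acc.find? p <;> cases h2 : p x <;>
        simp [Option.orElse, h2]

theorem find?_dedup (xs : List String) (p : String → Bool) :
    (PySem.List.dedup xs).find? p = xs.find? p := by
  have := find?_foldl_add xs [] p
  simpa [PySem.List.dedup, PySem.Set.ofList, PySem.Set.empty, Option.orElse] using this

theorem aPatLoop_eq (role sheet ns : String) (pats : List String)
    (sug : PySem.Dict String String) :
    aPatLoop role sheet ns pats sug
      = if bMatch pats ns then sug.insert role sheet else sug := by
  induction pats with
  | nil => simp [aPatLoop, bMatch]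
  | cons p ps ih =>
    rw [aPatLoop, ih]
    simp only [bMatch, List.any_cons]
    by_cases h : PySem.Chars.isIn p.toList ns.toList = true <;> simp [h]

theorem aSheetLoop_eq (role : String) (pats : List String) (l : List String)
    (d : PySem.Dict String String) (hno : bMatch pats (pvNormalize pvNoUsar) = false) :
    aSheetLoop role pats (l.map (fun k => (k, pvNormalize k))) (d.insert role pvNoUsar)
      = d.insert role (pvFirst pats l) := by
  induction l generalizing d with
  | nil => simp [aSheetLoop, pvFirst]
  | cons k l ih =>
    simp only [List.map_cons, aSheetLoop, aPatLoop_eq]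
    by_cases hm : bMatch pats (pvNormalize k) = true
    · rw [if_pos hm, PySem.Dict.insert_insert_self, PySem.Dict.getD_insert_self]
      have hk : k ≠ pvNoUsar := by
        intro h; rw [h] at hm; rw [hno] at hm; exact Bool.false_ne_true hm
      rw [if_neg hk]
      simp [pvFirst, hm]
    · rw [if_neg hm, PySem.Dict.getD_insert_self, if_pos rfl, ih]
      simp [pvFirst, Bool.eq_false_iff.mp (by simpa using hm)]

theorem hno_all : ∀ rp ∈ pvSheetPatterns, bMatch rp.2 (pvNormalize pvNoUsar) = false := by
  decide

-- A reduced to its per-role closed description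
theorem portA_eq (xs : List String) :
    suggest_sheet_mapping xs = pvSheetPatterns.map (fun rp => (rp.1, pvFirst rp.2 xs)) := by
  simp only [suggest_sheet_mapping, items_normFold]
  have hfold : ∀ (l : List (String × List String)) (d : PySem.Dict String String),
      (∀ rp ∈ l, bMatch rp.2 (pvNormalize pvNoUsar) = false) →
      l.foldl (fun d rp => aSheetLoop rp.1 rp.2
          ((PySem.List.dedup xs).map (fun k => (k, pvNormalize k))) (d.insert rp.1 pvNoUsar)) d
        = l.foldl (fun d rp => d.insert rp.1 (pvFirst rp.2 (PySem.List.dedup xs))) d := by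
    intro l
    induction l with
    | nil => intro d _; rfl
    | cons rp l ih =>
      intro d h
      simp only [List.foldl_cons]
      rw [aSheetLoop_eq _ _ _ _ (h rp (by simp))]
      exact ih _ (fun q hq => h q (by simp [hq]))
  rw [hfold _ _ hno_all]
  rw [PySem.Dict.items_foldl_insert_fresh pvSheetPatterns (fun rp => rp.1)
        (fun rp => pvFirst rp.2 (PySem.List.dedup xs)) PySem.Dict.empty
        (by intro a _; simp) (by decide)]
  rw [show (PySem.Dict.empty : PySem.Dict String String).items = [] from rfl, List.nil_append]
  apply List.map_congr_left
  intro rp _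
  have hfd := find?_dedup xs (fun s => bMatch rp.2 (pvNormalize s))
  rw [PySem.List.dedup_eq_ofList] at hfd
  simp only [pvFirst, PySem.List.dedup_eq_ofList, hfd]

theorem bInner_getD (ns sheet : String) (rem : List String)
    (a : PySem.Dict String String) (r : String) :
    (rem.foldl (fun a role => if bMatch (bPats role) ns then a.insert role sheet else a) a).getD
        r pvNoUsar
      = if r ∈ rem ∧ bMatch (bPats r) ns then sheet else a.getD r pvNoUsar := by
  induction rem generalizing a with
  | nil => simp
  | cons role rem ih =>
    simp only [List.foldl_cons, ih, List.mem_cons]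
    by_cases hm : bMatch (bPats role) ns = true
    · rw [if_pos hm, PySem.Dict.getD_insert]
      by_cases hr : r ∈ rem ∧ bMatch (bPats r) ns = true
      · simp [hr]
      · by_cases he : r = role <;> simp [hr, he, hm]
    · rw [if_neg hm]
      by_cases hr : r ∈ rem ∧ bMatch (bPats r) ns = true
      · simp [hr]
      · by_cases he : r = role <;> simp_all
  
theorem bInner_contains (ns sheet : String) (rem : List String)
    (a : PySem.Dict String String) (r : String) :
    (rem.foldl (fun a role => if bMatch (bPats role) ns then a.insert role sheet else a) a).contains
        r
      = if r ∈ rem ∧ bMatch (bPats r) ns then true else a.contains r := by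
  induction rem generalizing a with
  | nil => simp
  | cons role rem ih =>
    simp only [List.foldl_cons, ih, List.mem_cons]
    by_cases he : r = role <;> by_cases hr : r ∈ rem <;>
      by_cases hb : bMatch (bPats r) ns = true <;>
        by_cases hm : bMatch (bPats role) ns = true <;>
          simp_all [PySem.Dict.contains_insert]

theorem bLoop_getD (sheets : List String) (a : PySem.Dict String String)
    (rem : List String) (r : String) (hinv : r ∈ rem → a.contains r = false) :
    (bLoop sheets a rem).getD r pvNoUsar
      = if r ∈ rem then pvFirst (bPats r) sheets else a.getD r pvNoUsar := by
  induction sheets generalizing a rem with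
  | nil =>
    simp only [bLoop]
    by_cases hr : r ∈ rem
    · rw [if_pos hr, PySem.Dict.getD_of_not_contains _ _ (hinv hr)]
      simp [pvFirst]
    · rw [if_neg hr]
  | cons sheet rest ih =>
    simp only [bLoop]
    by_cases hemp : rem.isEmpty
    · rw [if_pos hemp]
      have : rem = [] := List.isEmpty_iff.mp hemp
      subst this; simp
    · rw [if_neg hemp]
      set ns := PySem.Str.lower (PySem.Str.strip sheet) with hns
      set a' := rem.foldl
        (fun a role => if bMatch (bPats role) ns then a.insert role sheet else a) a with ha'
      have hinv' : ∀ r', r' ∈ rem.filter (fun role => !(a'.contains role)) →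
          a'.contains r' = false := by
        intro r' hr'
        have := List.of_mem_filter hr'
        simpa using this
      rw [ih a' _ (fun h => hinv' r h)]
      by_cases hr : r ∈ rem
      · by_cases hm : bMatch (bPats r) ns = true
        · have hc : a'.contains r = true := by
            rw [ha', bInner_contains]; simp [hr, hm]
          have hnf : r ∉ rem.filter (fun role => !(a'.contains role)) := by
            intro hmem
            have := List.of_mem_filter hmem
            simp [hc] at this
          rw [if_neg hnf, if_pos hr, ha', bInner_getD, if_pos ⟨hr, hm⟩]
          have hm' : bMatch (bPats r) (pvNormalize sheet) = true := hm
          simp [pvFirst, hm']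
        · have hmf : bMatch (bPats r) ns = false := Bool.eq_false_iff.mpr hm
          have hc : a'.contains r = false := by
            rw [ha', bInner_contains]
            simp [hmf, hinv hr]
          have hf : r ∈ rem.filter (fun role => !(a'.contains role)) := by
            apply List.mem_filter.mpr
            exact ⟨hr, by simp [hc]⟩
          rw [if_pos hf, if_pos hr]
          have hmf' : bMatch (bPats r) (pvNormalize sheet) = false := hmf
          simp [pvFirst, hmf']
      · have hnf : r ∉ rem.filter (fun role => !(a'.contains role)) := by
          intro hmem; exact hr (List.mem_of_mem_filter hmem)
        rw [if_neg hnf, if_neg hr, ha', bInner_getD]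
        simp [hr]

theorem portB_eq (xs : List String) :
    suggest_sheet_mapping_alt xs
      = pvSheetPatterns.map (fun rp => (rp.1, pvFirst (bPats rp.1) xs)) := by
  unfold suggest_sheet_mapping_alt
  rw [PySem.Dict.items_foldl_insert_fresh pvSheetPatterns (fun rp => rp.1)
        (fun rp => (bLoop xs PySem.Dict.empty (pvSheetPatterns.map (·.1))).getD rp.1 pvNoUsar)
        PySem.Dict.empty (by intro a _; simp) (by decide)]
  rw [show (PySem.Dict.empty : PySem.Dict String String).items = [] from rfl, List.nil_append]
  apply List.map_congr_left
  intro rp hrp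
  rw [bLoop_getD _ _ _ _ (by intro _; simp)]
  rw [if_pos (List.mem_map.mpr ⟨rp, hrp, rfl⟩)]

theorem bPats_eq : ∀ rp ∈ pvSheetPatterns, bPats rp.1 = rp.2 := by decide

-- ===== VERDICT (by name: the statement is the Claim_ definition above) =====
theorem suggest_sheet_mapping_spec : Claim_equal_suggest_sheet_mapping := by
  intro xs _
  unfold Spec_suggest_sheet_mapping
  rw [portA_eq, portB_eq]
  apply List.map_congr_left
  intro rp hrp
  rw [bPats_eq rp hrp]
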